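-- pv_equiv track=rewrite | github.com/dipansadekeen/UAV_HP | tests/honeypot_2_without_state_QGC.py | canonicalize_internal_history_fields
-- ===== SOURCE A (Python) =====
-- INTERNAL_TO_CANONICAL = {
--     "gpi_lat": ("GLOBAL_POSITION_INT", "lat"),
--     "gpi_lon": ("GLOBAL_POSITION_INT", "lon"),
--     "gpi_alt": ("GLOBAL_POSITION_INT", "alt"),
--     "gpi_relative_alt": ("GLOBAL_POSITION_INT", "relative_alt"),
--     "gpi_vx": ("GLOBAL_POSITION_INT", "vx"),
--     "gpi_vy": ("GLOBAL_POSITION_INT", "vy"),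
--     "gpi_vz": ("GLOBAL_POSITION_INT", "vz"),
--     "gpi_hdg": ("GLOBAL_POSITION_INT", "hdg"),
--
--     "roll": ("ATTITUDE", "roll"),
--     "pitch": ("ATTITUDE", "pitch"),
--     "yaw": ("ATTITUDE", "yaw"),
--
--     "vfr_groundspeed": ("VFR_HUD", "groundspeed"),
--     "vfr_heading": ("VFR_HUD", "heading"),
--     "vfr_throttle": ("VFR_HUD", "throttle"),
--     "vfr_alt": ("VFR_HUD", "alt"),
--     "vfr_climb": ("VFR_HUD", "climb"),
--
--     "battery_remaining": ("SYS_STATUS", "battery_remaining"),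
--     "voltage_battery": ("SYS_STATUS", "voltage_battery"),
--     "load": ("SYS_STATUS", "load"),
--
--     "gps_fix_type": ("GPS_RAW_INT", "fix_type"),
-- }
--
-- def canonicalize_internal_history_fields(fields: dict) -> dict:
--     """
--     Convert your live HistoryBuffer flat internal fields into grouped canonical format.
--     """
--     if not isinstance(fields, dict):
--         return {}
--
--     out = {}
--
--     for k, v in fields.items():
--         mapped = INTERNAL_TO_CANONICAL.get(k)
--         if not mapped:
--             continue
--
--         msg_name, field_name = mapped
--         if msg_name not in out:
--             out[msg_name] = {}
--
--         out[msg_name][field_name] = v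
--
--     return out
-- ===== SOURCE B (Python) =====
-- # Grouped canonical table + recursive regrouping, instead of A's flat per-key dict
-- # mutated incrementally.
-- CANONICAL_GROUPS = [
--     ("GLOBAL_POSITION_INT", [
--         ("gpi_lat", "lat"), ("gpi_lon", "lon"), ("gpi_alt", "alt"),
--         ("gpi_relative_alt", "relative_alt"), ("gpi_vx", "vx"),
--         ("gpi_vy", "vy"), ("gpi_vz", "vz"), ("gpi_hdg", "hdg")]),
--     ("ATTITUDE", [("roll", "roll"), ("pitch", "pitch"), ("yaw", "yaw")]),
--     ("VFR_HUD", [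
--         ("vfr_groundspeed", "groundspeed"), ("vfr_heading", "heading"),
--         ("vfr_throttle", "throttle"), ("vfr_alt", "alt"), ("vfr_climb", "climb")]),
--     ("SYS_STATUS", [
--         ("battery_remaining", "battery_remaining"),
--         ("voltage_battery", "voltage_battery"), ("load", "load")]),
--     ("GPS_RAW_INT", [("gps_fix_type", "fix_type")]),
-- ]
--
--
-- def _lookup(key):
--     """Scan the grouped table for an internal key; return (msg_name, field_name)."""
--     for msg_name, group in CANONICAL_GROUPS:
--         for internal, field in group:
--             if internal == key:
--                 return (msg_name, field)
--     return None
--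
--
-- def _regroup(triples):
--     """Recursively peel off the first message group from a (msg, field, value) list."""
--     if not triples:
--         return {}
--     msg = triples[0][0]
--     mine = {f: v for m, f, v in triples if m == msg}
--     rest = _regroup([t for t in triples if t[0] != msg])
--     return {msg: mine, **rest}
--
--
-- def canonicalize_internal_history_fields(fields: dict) -> dict:
--     if not isinstance(fields, dict):
--         return {}
--     triples = []
--     for k, v in fields.items():
--         hit = _lookup(k)
--         if hit is not None:
--             triples.append((hit[0], hit[1], v))
--     return _regroup(triples)
-- ===== Notes on version B (the rewrite author's own statement) =====
-- stated objective: alternative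
-- what changed: A keeps a flat key->(msg,field) dict and mutates nested dicts in place per input field; B stores the mapping as a grouped table CANONICAL_GROUPS, resolves each field by scanning the groups, and builds the output by recursively peeling off one message group at a time from the collected (msg,field,value) triples.
import Mathlib
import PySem

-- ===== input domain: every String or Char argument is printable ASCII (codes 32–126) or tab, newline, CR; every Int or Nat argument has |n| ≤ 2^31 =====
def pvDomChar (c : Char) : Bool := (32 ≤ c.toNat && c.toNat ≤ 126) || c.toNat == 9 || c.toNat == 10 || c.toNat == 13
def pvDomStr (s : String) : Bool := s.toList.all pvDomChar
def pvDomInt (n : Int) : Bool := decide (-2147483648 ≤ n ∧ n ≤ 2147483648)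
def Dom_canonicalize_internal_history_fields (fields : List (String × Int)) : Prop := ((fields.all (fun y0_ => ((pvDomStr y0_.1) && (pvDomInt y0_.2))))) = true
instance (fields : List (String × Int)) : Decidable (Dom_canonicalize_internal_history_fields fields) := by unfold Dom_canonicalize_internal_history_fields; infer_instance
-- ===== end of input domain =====

-- B replaces A's flat key->(msg,field) dict and in-place nested-dict mutation with a grouped
-- canonical table, a nested-scan lookup, and a recursive regrouping that peels off one message
-- group at a time; alternative decomposition, same result.


-- ===== PORT A =====
-- A's module constant INTERNAL_TO_CANONICAL (a flat literal dict)
def INTERNAL_TO_CANONICAL : PySem.Dict String (String × String) := PySem.Dict.mk [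
  ("gpi_lat", ("GLOBAL_POSITION_INT", "lat")),
  ("gpi_lon", ("GLOBAL_POSITION_INT", "lon")),
  ("gpi_alt", ("GLOBAL_POSITION_INT", "alt")),
  ("gpi_relative_alt", ("GLOBAL_POSITION_INT", "relative_alt")),
  ("gpi_vx", ("GLOBAL_POSITION_INT", "vx")),
  ("gpi_vy", ("GLOBAL_POSITION_INT", "vy")),
  ("gpi_vz", ("GLOBAL_POSITION_INT", "vz")),
  ("gpi_hdg", ("GLOBAL_POSITION_INT", "hdg")),
  ("roll", ("ATTITUDE", "roll")),
  ("pitch", ("ATTITUDE", "pitch")),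
  ("yaw", ("ATTITUDE", "yaw")),
  ("vfr_groundspeed", ("VFR_HUD", "groundspeed")),
  ("vfr_heading", ("VFR_HUD", "heading")),
  ("vfr_throttle", ("VFR_HUD", "throttle")),
  ("vfr_alt", ("VFR_HUD", "alt")),
  ("vfr_climb", ("VFR_HUD", "climb")),
  ("battery_remaining", ("SYS_STATUS", "battery_remaining")),
  ("voltage_battery", ("SYS_STATUS", "voltage_battery")),
  ("load", ("SYS_STATUS", "load")),
  ("gps_fix_type", ("GPS_RAW_INT", "fix_type"))]

-- the 'fields' dict parameter: the association list is normalized into a dict (last value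
-- wins, first position kept), exactly as Python builds the dict A iterates over
def canonicalize_internal_history_fields (fields : List (String × Int)) : List (String × List (String × Int)) :=
  let out := (PySem.Dict.ofList fields).items.foldl (fun out kv =>
    match INTERNAL_TO_CANONICAL.get? kv.1 with
    | none => out   -- 'if not mapped: continue'
    | some mf =>
      -- 'if msg_name not in out: out[msg_name] = {}; out[msg_name][field_name] = v'
      out.modify mf.1 PySem.Dict.empty (fun inner => inner.insert mf.2 kv.2))
    PySem.Dict.empty
  out.items.map (fun p => (p.1, p.2.items))

-- ===== PORT B =====
-- B's module constant: the mapping grouped by message name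
def CANONICAL_GROUPS : List (String × List (String × String)) := [
  ("GLOBAL_POSITION_INT", [
    ("gpi_lat", "lat"), ("gpi_lon", "lon"), ("gpi_alt", "alt"),
    ("gpi_relative_alt", "relative_alt"), ("gpi_vx", "vx"),
    ("gpi_vy", "vy"), ("gpi_vz", "vz"), ("gpi_hdg", "hdg")]),
  ("ATTITUDE", [("roll", "roll"), ("pitch", "pitch"), ("yaw", "yaw")]),
  ("VFR_HUD", [
    ("vfr_groundspeed", "groundspeed"), ("vfr_heading", "heading"),
    ("vfr_throttle", "throttle"), ("vfr_alt", "alt"), ("vfr_climb", "climb")]),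
  ("SYS_STATUS", [
    ("battery_remaining", "battery_remaining"),
    ("voltage_battery", "voltage_battery"), ("load", "load")]),
  ("GPS_RAW_INT", [("gps_fix_type", "fix_type")])]

-- _lookup: nested scan of the grouped table for an internal key
def pvLookup (key : String) : Option (String × String) :=
  CANONICAL_GROUPS.findSome? (fun g =>
    (g.2.find? (fun e => e.1 == key)).map (fun e => (g.1, e.2)))

-- _regroup: recursively peel off the first message group
def pvRegroup : List (String × String × Int) → List (String × List (String × Int))
  | [] => []
  | t :: ts =>
    (t.1, (t :: ts).filterMap (fun u => if u.1 == t.1 then some (u.2.1, u.2.2) else none)) ::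
      pvRegroup (ts.filter (fun u => !(u.1 == t.1)))
termination_by l => l.length
decreasing_by
  simp only [List.length_unattach]
  refine Nat.lt_succ_of_le (le_trans (List.length_filter_le _ _) ?_)
  simp

def canonicalize_internal_history_fields_alt (fields : List (String × Int)) : List (String × List (String × Int)) :=
  let triples := (PySem.Dict.ofList fields).items.foldl (fun acc kv =>
    match pvLookup kv.1 with
    | none => acc                       -- 'if hit is not None'
    | some mf => acc ++ [(mf.1, mf.2, kv.2)]) []
  pvRegroup triples

-- ===== PRECONDITION & SPEC =====
def Spec_canonicalize_internal_history_fields (fields : List (String × Int)) (out : List (String × List (String × Int))) : Prop := out = canonicalize_internal_history_fields_alt fields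
instance (fields : List (String × Int)) (out : List (String × List (String × Int))) : Decidable (Spec_canonicalize_internal_history_fields fields out) := by unfold Spec_canonicalize_internal_history_fields; infer_instance

-- ===== CLAIM (what is proved, stated in full; the proofs are below) =====
def Claim_equal_canonicalize_internal_history_fields : Prop := ∀ (fields : List (String × Int)), Dom_canonicalize_internal_history_fields fields → Spec_canonicalize_internal_history_fields fields (canonicalize_internal_history_fields fields)

-- ===== LEMMAS AND PROOFS =====

-- shorthand for the proofs: the step of A's fold, on already-mapped triples
def pvStep (d : PySem.Dict String (PySem.Dict String Int)) (t : String × String × Int) : PySem.Dict String (PySem.Dict String Int) :=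
  d.modify t.1 PySem.Dict.empty (fun inner => inner.insert t.2.1 t.2.2)

def pvGroup (m : String) (T : List (String × String × Int)) : List (String × Int) :=
  T.filterMap (fun t => if t.1 == m then some (t.2.1, t.2.2) else none)

-- B's lookup over the grouped table equals A's flat dict lookup
theorem pv_findSome_flat (k : String) (gs : List (String × List (String × String))) :
    gs.findSome? (fun g => (g.2.find? (fun e => e.1 == k)).map (fun e => (g.1, e.2)))
      = (gs.flatMap (fun g => g.2.map (fun e => (e.1, g.1, e.2)))).findSome?
          (fun q => if q.1 == k then some q.2 else none) := by
  induction gs with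
  | nil => rfl
  | cons g gs ih =>
    simp only [List.findSome?_cons, List.flatMap_cons, List.findSome?_append]
    have hg : ∀ (l : List (String × String)),
        (l.find? (fun e => e.1 == k)).map (fun e => (g.1, e.2))
          = (l.map (fun e => (e.1, g.1, e.2))).findSome? (fun q => if q.1 == k then some q.2 else none) := by
      intro l
      induction l with
      | nil => rfl
      | cons e l ihl =>
        simp only [List.find?_cons, List.map_cons, List.findSome?_cons]
        by_cases he : (e.1 == k) = true <;> simp [he, ihl]
    rw [hg]
    cases h : (g.2.map (fun e => (e.1, g.1, e.2))).findSome? (fun q => if q.1 == k then some q.2 else none) with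
    | none => simp [ih]
    | some v => simp

theorem pv_get?_eq_findSome (l : List (String × (String × String))) (k : String) :
    (PySem.Dict.mk l).get? k = l.findSome? (fun q => if q.1 == k then some q.2 else none) := by
  induction l with
  | nil => simp [PySem.Dict.get?]
  | cons p l ih =>
    rw [show p = (p.1, p.2) from rfl, PySem.Dict.get?_mk_cons, List.findSome?_cons]
    by_cases h : (p.1 == k) = true <;> simp [h, ih]

theorem pv_lookup_eq (k : String) : pvLookup k = INTERNAL_TO_CANONICAL.get? k := by
  rw [pvLookup, pv_findSome_flat, INTERNAL_TO_CANONICAL, pv_get?_eq_findSome]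
  rfl

-- B's lookup and A's agree pointwise, as loop bodies
theorem pv_lookup_fun_eq :
    (fun (acc : List (String × String × Int)) (kv : String × Int) =>
      match pvLookup kv.1 with
      | none => acc
      | some mf => acc ++ [(mf.1, mf.2, kv.2)])
    = (fun acc kv =>
      match INTERNAL_TO_CANONICAL.get? kv.1 with
      | none => acc
      | some mf => acc ++ [(mf.1, mf.2, kv.2)]) := by
  funext acc kv; rw [pv_lookup_eq]

-- B's append loop over fields equals a filterMap
theorem pv_foldl_append_triples (L : List (String × Int)) (acc : List (String × String × Int)) :
    L.foldl (fun acc kv =>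
      match INTERNAL_TO_CANONICAL.get? kv.1 with
      | none => acc
      | some mf => acc ++ [(mf.1, mf.2, kv.2)]) acc
    = acc ++ L.filterMap (fun kv => (INTERNAL_TO_CANONICAL.get? kv.1).map (fun mf => (mf.1, mf.2, kv.2))) := by
  induction L generalizing acc with
  | nil => simp
  | cons kv L ih =>
    simp only [List.foldl_cons, List.filterMap_cons]
    cases h : INTERNAL_TO_CANONICAL.get? kv.1 with
    | none => simp [ih]
    | some mf => simp [ih]

-- A's fold over fields equals the fold of pvStep over the mapped triples
theorem pv_foldl_filterMap (L : List (String × Int)) (d : PySem.Dict String (PySem.Dict String Int)) :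
    L.foldl (fun out kv =>
      match INTERNAL_TO_CANONICAL.get? kv.1 with
      | none => out
      | some mf => out.modify mf.1 PySem.Dict.empty (fun inner => inner.insert mf.2 kv.2)) d
    = (L.filterMap (fun kv => (INTERNAL_TO_CANONICAL.get? kv.1).map (fun mf => (mf.1, mf.2, kv.2)))).foldl pvStep d := by
  induction L generalizing d with
  | nil => rfl
  | cons kv L ih =>
    simp only [List.foldl_cons, List.filterMap_cons]
    cases h : INTERNAL_TO_CANONICAL.get? kv.1 with
    | none => simp [ih]
    | some mf => simp [ih, pvStep]

-- values-nodup association list: equal values force equal keys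
theorem pv_key_of_val {α β : Type} [DecidableEq β] (l : List (α × β)) (h : (l.map (fun p => p.2)).Nodup)
    {k1 k2 : α} {p : β} (h1 : (k1, p) ∈ l) (h2 : (k2, p) ∈ l) : k1 = k2 := by
  induction l with
  | nil => cases h1
  | cons x l ih =>
    simp only [List.map_cons, List.nodup_cons] at h
    rcases List.mem_cons.1 h1 with e1 | m1 <;> rcases List.mem_cons.1 h2 with e2 | m2
    · exact congrArg Prod.fst (e1.trans e2.symm)
    · exact absurd (List.mem_map.2 ⟨_, m2, by rw [← e1] ⟩) h.1
    · exact absurd (List.mem_map.2 ⟨_, m1, by rw [← e2] ⟩) h.1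
    · exact ih h.2 m1 m2

theorem pv_dedup_app (xs : List String) (x : String) :
    PySem.List.dedup (xs ++ [x]) = if x ∈ xs then PySem.List.dedup xs else PySem.List.dedup xs ++ [x] := by
  simp only [PySem.List.dedup_eq_ofList, PySem.Set.ofList, List.foldl_append, List.foldl_cons,
    List.foldl_nil, PySem.Set.add, PySem.Set.contains]
  have hmem : x ∈ List.foldl PySem.Set.add [] xs ↔ x ∈ xs := by
    simpa [PySem.Set.ofList, PySem.Set.empty] using PySem.Set.mem_ofList xs x
  by_cases h : x ∈ xs
  · simp [h, hmem]
  · simp [h, hmem]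

theorem pv_group_append (m : String) (T : List (String × String × Int)) (t : String × String × Int) :
    pvGroup m (T ++ [t]) = pvGroup m T ++ (if t.1 == m then [(t.2.1, t.2.2)] else []) := by
  simp only [pvGroup, List.filterMap_append, List.filterMap_cons, List.filterMap_nil]
  by_cases he : (t.1 == m) = true <;> simp [he]

theorem pv_group_nil (m : String) (T : List (String × String × Int))
    (h : m ∉ T.map (fun t => t.1)) : pvGroup m T = [] := by
  rw [pvGroup, List.filterMap_eq_nil_iff]
  intro t ht
  have : t.1 ≠ m := fun e => h (List.mem_map.2 ⟨t, ht, e⟩)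
  simp [this]

theorem pv_mem_group_fst (m f : String) (T : List (String × String × Int))
    (hf : f ∈ (pvGroup m T).map (fun p => p.1)) : (m, f) ∈ T.map (fun t => (t.1, t.2.1)) := by
  rcases List.mem_map.1 hf with ⟨p, hp, hpf⟩
  rcases List.mem_filterMap.1 hp with ⟨t, ht, hsome⟩
  by_cases he : t.1 == m
  · rw [if_pos he] at hsome
    cases hsome
    exact List.mem_map.2 ⟨t, ht, by simp only [← hpf]; exact congrArg (fun z => (z, t.2.1)) (by simpa using he)⟩
  · rw [if_neg he] at hsome; cases hsome

theorem pv_keys (T : List (String × String × Int)) :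
    (T.foldl pvStep PySem.Dict.empty).keys = PySem.List.dedup (T.map (fun t => t.1)) := by
  have h := PySem.Dict.keys_foldl_modify_key T (fun t => t.1) PySem.Dict.empty
    (fun _ t => fun inner => inner.insert t.2.1 t.2.2) PySem.Dict.empty
  simpa [pvStep, PySem.List.dedup_eq_ofList, PySem.Set.ofList, PySem.Set.update,
    PySem.Set.empty] using h

-- characterisation of A's fold: one entry per distinct message, carrying its group
theorem pv_main (T : List (String × String × Int))
    (h : (T.map (fun t => (t.1, t.2.1))).Nodup) :
    (T.foldl pvStep PySem.Dict.empty).items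
      = (PySem.List.dedup (T.map (fun t => t.1))).map (fun m => (m, PySem.Dict.mk (pvGroup m T))) := by
  induction T using List.reverseRecOn with
  | nil => rfl
  | append_singleton T t ih =>
    have hsplit : (T.map (fun t => (t.1, t.2.1))).Nodup ∧
        (t.1, t.2.1) ∉ T.map (fun t => (t.1, t.2.1)) := by
      rw [List.map_append] at h
      simp only [List.map_cons, List.map_nil] at h
      refine ⟨(List.nodup_append.1 h).1, fun hc => ?_⟩
      exact (List.nodup_append.1 h).2.2 _ hc _ (List.mem_singleton.mpr rfl) rfl
    have hT := hsplit.1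
    have hnew := hsplit.2
    have ihh := ih hT
    have hkeys := pv_keys T
    have hknd : (T.foldl pvStep PySem.Dict.empty).keys.Nodup := by
      rw [hkeys, PySem.List.dedup_eq_ofList]; exact PySem.Set.nodup_ofList _
    rw [List.foldl_append, List.foldl_cons, List.foldl_nil]
    show (pvStep (T.foldl pvStep PySem.Dict.empty) t).items = _
    rw [pvStep, PySem.Dict.modify]
    by_cases hm : t.1 ∈ T.map (fun t => t.1)
    · -- message already present: insert replaces the entry at key t.1
      have hcon : (T.foldl pvStep PySem.Dict.empty).contains t.1 = true := by
        rw [PySem.Dict.contains_iff_mem_keys, hkeys, PySem.List.dedup_eq_ofList]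
        exact (PySem.Set.mem_ofList _ _).2 hm
      have hmemit : (t.1, PySem.Dict.mk (pvGroup t.1 T)) ∈ (T.foldl pvStep PySem.Dict.empty).items := by
        rw [ihh]
        exact List.mem_map.2 ⟨t.1, by
          rw [PySem.List.dedup_eq_ofList]; exact (PySem.Set.mem_ofList _ _).2 hm, rfl⟩
      have hgetD : (T.foldl pvStep PySem.Dict.empty).getD t.1 PySem.Dict.empty
          = PySem.Dict.mk (pvGroup t.1 T) :=
        PySem.Dict.getD_of_mem_items _ hmemit hknd _
      have hfnot : (PySem.Dict.mk (pvGroup t.1 T)).contains t.2.1 = false := by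
        rw [Bool.eq_false_iff]
        intro hc
        apply hnew
        apply pv_mem_group_fst t.1 t.2.1 T
        rw [PySem.Dict.contains_iff_mem_keys] at hc
        simpa [PySem.Dict.keys] using hc
      have hinner : (PySem.Dict.mk (pvGroup t.1 T)).insert t.2.1 t.2.2
          = PySem.Dict.mk (pvGroup t.1 T ++ [(t.2.1, t.2.2)]) := by
        rw [PySem.Dict.insert, hfnot]; simp
      rw [hgetD, hinner, PySem.Dict.items_insert_of_contains _ _ hcon, ihh]
      simp only [List.map_append, List.map_cons, List.map_nil]
      rw [pv_dedup_app, if_pos hm, List.map_map]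
      apply List.map_congr_left
      intro m hmem
      have hmT : m ∈ T.map (fun t => t.1) := by
        rw [PySem.List.dedup_eq_ofList] at hmem
        exact (PySem.Set.mem_ofList _ _).1 hmem
      by_cases he : m = t.1
      · subst he
        simp [pv_group_append, Function.comp]
      · have hne : ¬ (m == t.1) = true := by simpa using he
        have hne' : ¬ (t.1 == m) = true := by simpa using fun e => he e.symm
        simp [Function.comp, hne, pv_group_append, hne']
    · -- new message: insert appends a fresh entry
      have hcon : (T.foldl pvStep PySem.Dict.empty).contains t.1 = false := by
        rw [Bool.eq_false_iff]
        intro hc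
        rw [PySem.Dict.contains_iff_mem_keys, hkeys, PySem.List.dedup_eq_ofList] at hc
        exact hm ((PySem.Set.mem_ofList _ _).1 hc)
      rw [PySem.Dict.getD_of_not_contains _ _ hcon,
        PySem.Dict.items_insert_of_not_contains _ _ hcon, ihh]
      simp only [List.map_append, List.map_cons, List.map_nil]
      rw [pv_dedup_app, if_neg hm, List.map_append]
      congr 1
      · apply List.map_congr_left
        intro m hmem
        have hmT : m ∈ T.map (fun t => t.1) := by
          rw [PySem.List.dedup_eq_ofList] at hmem
          exact (PySem.Set.mem_ofList _ _).1 hmem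
        have hne : ¬ (t.1 == m) = true := by
          simp only [beq_iff_eq]
          intro e; exact hm (by rw [e]; exact hmT)
        simp [pv_group_append, hne]
      · have hgt : pvGroup t.1 (T ++ [t]) = [(t.2.1, t.2.2)] := by
          rw [pv_group_append, pv_group_nil t.1 T hm]; simp
        simp only [List.map_cons, List.map_nil, hgt]
        rfl

-- the canonical mapping is injective: distinct internal keys map to distinct pairs
theorem pv_canon_inj (k1 k2 : String) (p : String × String)
    (h1 : INTERNAL_TO_CANONICAL.get? k1 = some p) (h2 : INTERNAL_TO_CANONICAL.get? k2 = some p) :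
    k1 = k2 := by
  have hv : (INTERNAL_TO_CANONICAL.items.map (fun q => q.2)).Nodup := by decide
  exact pv_key_of_val _ hv (PySem.Dict.mem_items_of_get?_eq_some _ h1)
    (PySem.Dict.mem_items_of_get?_eq_some _ h2)

-- dedup lemmas for pvRegroup's characterisation
theorem pv_foldl_add_filter (l : List String) (acc : List String) (x : String) (hx : x ∈ acc) :
    List.foldl PySem.Set.add acc (l.filter (fun y => !(y == x))) = List.foldl PySem.Set.add acc l := by
  induction l generalizing acc with
  | nil => rfl
  | cons y l ih =>
    by_cases h : (y == x) = true
    · have hy : y = x := by simpa using h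
      have hstep : PySem.Set.add acc y = acc := by
        simp [PySem.Set.add, PySem.Set.contains, hy, hx]
      simp [h, ih acc hx, hstep]
    · have hx' : x ∈ PySem.Set.add acc y := by
        simp only [PySem.Set.add]
        split <;> simp [hx]
      simp [h, ih _ hx']

theorem pv_add_cons (l : List String) : ∀ (acc : List String) (x : String), x ∉ l → x ∉ acc →
    List.foldl PySem.Set.add (x :: acc) l = x :: List.foldl PySem.Set.add acc l := by
  induction l with
  | nil => intro acc x _ _; rfl
  | cons y l ih =>
    intro acc x hxl hxa
    have hyx : ¬ (y == x) = true := by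
      simp only [beq_iff_eq]; intro e; exact hxl (e ▸ List.mem_cons_self ..)
    have hstep : PySem.Set.add (x :: acc) y = x :: PySem.Set.add acc y := by
      simp only [PySem.Set.add, PySem.Set.contains, List.contains_cons]
      have hf : (y == x) = false := Bool.eq_false_iff.mpr hyx
      rw [hf, Bool.false_or]
      split <;> simp_all
    have hxa' : x ∉ PySem.Set.add acc y := by
      simp only [PySem.Set.add]
      split
      · exact hxa
      · intro hc
        rcases List.mem_append.1 hc with h | h
        · exact hxa h
        · exact hyx (by simpa using (List.mem_singleton.1 h).symm)
    rw [List.foldl_cons, hstep, List.foldl_cons,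
      ih _ x (fun h => hxl (List.mem_cons_of_mem _ h)) hxa']

theorem pv_dedup_cons (x : String) (xs : List String) :
    PySem.List.dedup (x :: xs) = x :: PySem.List.dedup (xs.filter (fun y => !(y == x))) := by
  have hxf : x ∉ xs.filter (fun y => !(y == x)) := by
    intro hc
    have := (List.mem_filter.1 hc).2
    simp at this
  calc PySem.List.dedup (x :: xs)
      = List.foldl PySem.Set.add [x] xs := by
        simp [PySem.List.dedup_eq_ofList, PySem.Set.ofList, PySem.Set.empty]
    _ = List.foldl PySem.Set.add [x] (xs.filter (fun y => !(y == x))) := by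
        rw [pv_foldl_add_filter _ _ _ (List.mem_singleton.2 rfl)]
    _ = x :: List.foldl PySem.Set.add [] (xs.filter (fun y => !(y == x))) := by
        exact pv_add_cons _ [] x hxf (by simp)
    _ = x :: PySem.List.dedup (xs.filter (fun y => !(y == x))) := by
        simp [PySem.List.dedup_eq_ofList, PySem.Set.ofList, PySem.Set.empty]

theorem pv_group_filter (m x : String) (hmx : m ≠ x) (T : List (String × String × Int)) :
    pvGroup m (T.filter (fun u => !(u.1 == x))) = pvGroup m T := by
  induction T with
  | nil => rfl
  | cons t T ih =>
    by_cases h : (t.1 == x) = true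
    · have ht1 : t.1 = x := by simpa using h
      have hm' : t.1 ≠ m := by
        rw [ht1]; exact fun e => hmx e.symm
      have hhead : pvGroup m (t :: T) = pvGroup m T := by
        simp [pvGroup, hm']
      rw [List.filter_cons]
      simp only [h, Bool.not_true, Bool.false_eq_true, if_false]
      rw [ih, hhead]
    · have hkeep : (!(t.1 == x)) = true := by simp [h]
      rw [List.filter_cons, if_pos hkeep]
      simp only [pvGroup] at ih ⊢
      rw [List.filterMap_cons, List.filterMap_cons]
      by_cases ht : (t.1 == m) = true
      · rw [if_pos ht]
        simp only [ih]
      · rw [if_neg ht]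
        simp only [ih]

theorem pv_map_fst_filter (x : String) (ts : List (String × String × Int)) :
    (ts.filter (fun u => !(u.1 == x))).map (fun u => u.1)
      = (ts.map (fun u => u.1)).filter (fun y => !(y == x)) := by
  induction ts with
  | nil => rfl
  | cons u us ihu =>
    by_cases h : (u.1 == x) = true <;> simp [h, ihu]

-- characterisation of B's regrouping: same dedup-of-messages map
theorem pv_regroup_eq_aux : ∀ (n : Nat) (T : List (String × String × Int)), T.length ≤ n →
    pvRegroup T = (PySem.List.dedup (T.map (fun t => t.1))).map (fun m => (m, pvGroup m T)) := by
  intro n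
  induction n with
  | zero =>
    intro T hT
    have : T = [] := List.eq_nil_of_length_eq_zero (Nat.le_zero.1 hT)
    subst this
    simp [pvRegroup, PySem.List.dedup_eq_ofList, PySem.Set.ofList, PySem.Set.empty]
  | succ n ihn =>
    intro T hT
    match T with
    | [] => simp [pvRegroup, PySem.List.dedup_eq_ofList, PySem.Set.ofList, PySem.Set.empty]
    | t :: ts =>
    have ih := ihn (ts.filter (fun u => !(u.1 == t.1)))
      (le_trans (List.length_filter_le _ _) (Nat.le_of_succ_le_succ hT))
    rw [pvRegroup, ih]
    simp only [List.map_cons, pv_dedup_cons]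
    congr 1
    rw [pv_map_fst_filter t.1 ts]
    apply List.map_congr_left
    intro m hmem
    have hmne : m ≠ t.1 := by
      have h1 := (PySem.List.mem_dedup _ _).1 hmem
      have h2 := (List.mem_filter.1 h1).2
      simpa using h2
    rw [pv_group_filter m t.1 hmne]
    have hne : t.1 ≠ m := fun e => hmne e.symm
    simp [pvGroup, hne]

-- ===== VERDICT (by name: the statement is the Claim_ definition above) =====
theorem canonicalize_internal_history_fields_spec : Claim_equal_canonicalize_internal_history_fields := by
  intro fields _
  unfold Spec_canonicalize_internal_history_fields
  unfold canonicalize_internal_history_fields canonicalize_internal_history_fields_alt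
  dsimp only
  rw [pv_foldl_filterMap, pv_lookup_fun_eq, pv_foldl_append_triples, List.nil_append]
  set L := (PySem.Dict.ofList fields).items with hL
  set mapped := L.filterMap (fun kv => (INTERNAL_TO_CANONICAL.get? kv.1).map (fun mf => (mf.1, mf.2, kv.2))) with hmapped
  have hpairs : mapped.map (fun t => (t.1, t.2.1))
      = (L.map (fun kv => kv.1)).filterMap INTERNAL_TO_CANONICAL.get? := by
    rw [hmapped, List.map_filterMap, List.filterMap_map]
    apply List.filterMap_congr
    intro kv _
    cases hg : INTERNAL_TO_CANONICAL.get? kv.1 <;> simp [hg, Function.comp]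
  have hnd : (mapped.map (fun t => (t.1, t.2.1))).Nodup := by
    rw [hpairs]
    apply List.Nodup.filterMap
    · intro a a' b hb hb'
      exact pv_canon_inj a a' b (Option.mem_def.1 hb) (Option.mem_def.1 hb')
    · have := PySem.Dict.nodup_keys_ofList (fields)
      simpa [PySem.Dict.keys, hL] using this
  rw [pv_main mapped hnd, pv_regroup_eq_aux mapped.length mapped le_rfl, List.map_map]
  rfl
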